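-- pv_equiv track=rewrite | github.com/furlanut/lottery-lab | scripts/research_gaps.py | sig_freq_rit_fig
-- ===== SOURCE A (Python) =====
-- def sig_freq_rit_fig(pair, freq, last, ctx):
--     a, b = pair
--     fa, fb = a, b
--     while fa >= 10:
--         fa = sum(int(d) for d in str(fa))
--     while fb >= 10:
--         fb = sum(int(d) for d in str(fb))
--     return freq >= 1 and last >= ctx['soglia_rit'] and fa == fb
-- ===== SOURCE B (Python) =====
-- def sig_freq_rit_fig(pair, freq, last, ctx):
--     a, b = pair
--     dr = lambda n: n if n < 10 else 1 + (n - 1) % 9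
--     return freq >= 1 and last >= ctx['soglia_rit'] and dr(a) == dr(b)
-- ===== Notes on version B (the rewrite author's own statement) =====
-- stated objective: idiomatic
-- what changed: The two iterative repeated-digit-sum while loops (converting the number to a string each pass) are replaced by the closed-form digital root 'n if n < 10 else 1 + (n - 1) % 9' applied to each component; the final conjunction is unchanged.
import Mathlib
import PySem

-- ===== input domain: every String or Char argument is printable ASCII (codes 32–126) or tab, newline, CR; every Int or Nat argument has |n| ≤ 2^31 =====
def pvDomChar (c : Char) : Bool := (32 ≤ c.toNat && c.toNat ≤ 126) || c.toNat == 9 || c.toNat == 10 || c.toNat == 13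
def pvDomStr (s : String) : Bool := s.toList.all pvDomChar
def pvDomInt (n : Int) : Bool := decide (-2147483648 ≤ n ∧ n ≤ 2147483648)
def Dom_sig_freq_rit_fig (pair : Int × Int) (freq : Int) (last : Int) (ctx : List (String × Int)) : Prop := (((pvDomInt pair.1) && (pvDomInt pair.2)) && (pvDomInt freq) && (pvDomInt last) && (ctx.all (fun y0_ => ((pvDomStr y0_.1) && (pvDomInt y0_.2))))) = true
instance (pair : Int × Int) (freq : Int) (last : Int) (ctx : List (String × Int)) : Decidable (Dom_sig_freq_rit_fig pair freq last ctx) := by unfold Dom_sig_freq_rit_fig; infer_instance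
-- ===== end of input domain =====

-- B replaces A's two iterative repeated-digit-sum loops with the closed-form digital root (idiomatic, same result).

-- ===== PORT A =====
-- sum(int(d) for d in str(fa)); exact here: int(d) on a decimal digit character d is its code minus 48,
-- and in A this sum is only ever taken for fa ≥ 10, whose str consists of decimal digits only.
def pvDigitSum (n : Int) : Int :=
  ((PySem.Int.toChars n).map (fun c => ((c.toNat : Int) - 48))).sum

-- the 'while fa >= 10' loop; the fuel argument only makes the recursion total (the sum of digits
-- strictly decreases, so fuel n.toNat + 1 is never exhausted) and mirrors no Python construct.
def pvDigitLoop : Nat → Int → Int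
  | 0, fa => fa
  | f + 1, fa => if fa ≥ 10 then pvDigitLoop f (pvDigitSum fa) else fa

def sig_freq_rit_fig (pair : Int × Int) (freq : Int) (last : Int) (ctx : List (String × Int)) : Bool :=
  let fa := pvDigitLoop (pair.1.toNat + 1) pair.1
  let fb := pvDigitLoop (pair.2.toNat + 1) pair.2
  if freq ≥ 1 then
    match (ctx.find? (fun p => p.1 == "soglia_rit")).map Prod.snd with
    | none => false          -- Python raises KeyError here; excluded by Pre_
    | some t => decide (last ≥ t) && decide (fa = fb)
  else false

-- ===== PORT B =====
-- dr = lambda n: n if n < 10 else 1 + (n - 1) % 9    (Python % = fmod)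
def pvDr (n : Int) : Int := if n < 10 then n else 1 + PySem.Int.mod (n - 1) 9

def sig_freq_rit_fig_alt (pair : Int × Int) (freq : Int) (last : Int) (ctx : List (String × Int)) : Bool :=
  if freq ≥ 1 then
    match (ctx.find? (fun p => p.1 == "soglia_rit")).map Prod.snd with
    | none => false          -- Python raises KeyError here; excluded by Pre_
    | some t => decide (last ≥ t) && decide (pvDr pair.1 = pvDr pair.2)
  else false

-- ===== PRECONDITION & SPEC =====
-- Pre_ excludes exactly the inputs where Python A (and Python B alike) raises KeyError:
-- freq >= 1 forces the lookup ctx['soglia_rit'], which must then find the key.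
def Pre_sig_freq_rit_fig (pair : Int × Int) (freq : Int) (last : Int) (ctx : List (String × Int)) : Prop :=
  freq ≥ 1 → "soglia_rit" ∈ ctx.map Prod.fst
instance (pair : Int × Int) (freq : Int) (last : Int) (ctx : List (String × Int)) : Decidable (Pre_sig_freq_rit_fig pair freq last ctx) := by unfold Pre_sig_freq_rit_fig; infer_instance

def pvWitness_sig_freq_rit_fig : (Int × Int) × Int × Int × (List (String × Int)) :=
  ((12, 21), 1, 5, [("soglia_rit", 3)])

def Spec_sig_freq_rit_fig (pair : Int × Int) (freq : Int) (last : Int) (ctx : List (String × Int)) (out : Bool) : Prop := out = sig_freq_rit_fig_alt pair freq last ctx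
instance (pair : Int × Int) (freq : Int) (last : Int) (ctx : List (String × Int)) (out : Bool) : Decidable (Spec_sig_freq_rit_fig pair freq last ctx out) := by unfold Spec_sig_freq_rit_fig; infer_instance

-- ===== CLAIM (what is proved, stated in full; the proofs are below) =====
def Claim_equal_sig_freq_rit_fig : Prop := ∀ (pair : Int × Int) (freq : Int) (last : Int) (ctx : List (String × Int)), Dom_sig_freq_rit_fig pair freq last ctx → Pre_sig_freq_rit_fig pair freq last ctx → Spec_sig_freq_rit_fig pair freq last ctx (sig_freq_rit_fig pair freq last ctx)

-- ===== LEMMAS AND PROOFS =====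

-- core's Nat.toDigits fuel recursion produces exactly the base-10 digits, most significant first
theorem pv_toDigitsCore_eq : ∀ (f n : Nat) (l : List Char), 0 < n → n ≤ f →
    Nat.toDigitsCore 10 f n l = ((Nat.digits 10 n).map Nat.digitChar).reverse ++ l := by
  intro f
  induction f with
  | zero => intro n l h1 h2; omega
  | succ f ih =>
    intro n l h1 _
    rw [Nat.toDigitsCore]
    by_cases h10 : n / 10 = 0
    · have hn : n < 10 := by omega
      have : Nat.digits 10 n = [n % 10] := by
        rw [Nat.digits_def' (by norm_num : 1 < 10) h1, h10]; simp
      simp [h10, this, Nat.mod_eq_of_lt hn]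
    · have hlt : n / 10 < n := Nat.div_lt_self h1 (by norm_num)
      rw [if_neg h10, ih (n / 10) _ (Nat.pos_of_ne_zero h10) (by omega),
        Nat.digits_def' (by norm_num : 1 < 10) h1]
      simp

theorem pv_digitChar_val (d : Nat) (hd : d < 10) :
    ((Nat.digitChar d).toNat : Int) - 48 = (d : Int) := by
  interval_cases d <;> decide

theorem pv_digitSum_eq (n : Int) (hn : 10 ≤ n) :
    pvDigitSum n = ((Nat.digits 10 n.toNat).sum : Int) := by
  have hneg : ¬ n < 0 := by omega
  have hpos : 0 < n.toNat := by omega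
  unfold pvDigitSum
  rw [PySem.Int.toChars, if_neg hneg, Nat.toDigits,
    pv_toDigitsCore_eq (n.toNat + 1) n.toNat [] hpos (by omega)]
  rw [List.append_nil, List.map_reverse, List.sum_reverse, List.map_map]
  have hgen : ∀ l : List Nat, (∀ d ∈ l, d < 10) →
      (l.map ((fun c => ((c.toNat : Int) - 48)) ∘ Nat.digitChar)).sum = (l.sum : Int) := by
    intro l
    induction l with
    | nil => intro _; simp
    | cons d t iht =>
      intro hall
      simp only [List.map_cons, List.sum_cons, Function.comp_apply]
      rw [pv_digitChar_val d (hall d (by simp)), iht (fun x hx => hall x (by simp [hx]))]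
      push_cast
      ring
  exact hgen _ (fun d hd => Nat.digits_lt_base (by norm_num) hd)

theorem pv_digitSum_mod9 (n : Int) (hn : 10 ≤ n) : pvDigitSum n % 9 = n % 9 := by
  rw [pv_digitSum_eq n hn]
  have h := Nat.modEq_nine_digits_sum n.toNat
  have hcast : (n.toNat : Int) % 9 = ((Nat.digits 10 n.toNat).sum : Int) % 9 := by
    have := h.symm
    unfold Nat.ModEq at this
    omega
  have hn' : (n.toNat : Int) = n := by omega
  omega

theorem pv_digitSum_bounds (n : Int) (hn : 10 ≤ n) :
    1 ≤ pvDigitSum n ∧ pvDigitSum n < n := by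
  rw [pv_digitSum_eq n hn]
  set m := n.toNat with hm
  have hm10 : 10 ≤ m := by omega
  have hmpos : 0 < m := by omega
  have hdef : Nat.digits 10 m = m % 10 :: Nat.digits 10 (m / 10) :=
    Nat.digits_def' (by norm_num) hmpos
  constructor
  · -- sum ≥ 1: the leading digit is nonzero, and every element is ≤ the sum
    have hlast := Nat.getLast_digit_ne_zero 10 (by omega : m ≠ 0)
    have hmem : (Nat.digits 10 m).getLast (Nat.digits_ne_nil_iff_ne_zero.mpr (by omega)) ∈ Nat.digits 10 m :=
      List.getLast_mem _
    have hle : (Nat.digits 10 m).getLast (Nat.digits_ne_nil_iff_ne_zero.mpr (by omega)) ≤ (Nat.digits 10 m).sum :=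
      List.single_le_sum (fun _ _ => Nat.zero_le _) _ hmem
    have : 1 ≤ (Nat.digits 10 m).sum := by omega
    exact_mod_cast by omega
  · -- sum < m
    have hsum' : (Nat.digits 10 (m / 10)).sum ≤ m / 10 := Nat.digit_sum_le 10 (m / 10)
    have hsum : (Nat.digits 10 m).sum = m % 10 + (Nat.digits 10 (m / 10)).sum := by
      rw [hdef]; simp
    have hdm := Nat.div_add_mod m 10
    have : (Nat.digits 10 m).sum < m := by omega
    omega

-- the digital root is determined by the residue mod 9 together with positivity
theorem pv_dr_congr (s n : Int) (hs : 1 ≤ s) (hn : 10 ≤ n) (hmod : s % 9 = n % 9) :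
    pvDr s = pvDr n := by
  unfold pvDr
  rw [if_neg (by omega : ¬ n < 10)]
  have hfm : ∀ a : Int, 0 ≤ a → PySem.Int.mod a 9 = a % 9 := by
    intro a _
    show a.fmod 9 = a % 9
    rw [Int.fmod_eq_emod]
    simp
  by_cases hs10 : s < 10
  · rw [if_pos hs10, hfm (n - 1) (by omega)]
    have h1 : (s - 1) % 9 = s - 1 := Int.emod_eq_of_lt (by omega) (by omega)
    have h2 : (n - 1) % 9 = (s - 1) % 9 := by omega
    omega
  · rw [if_neg hs10, hfm (n - 1) (by omega), hfm (s - 1) (by omega)]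
    have : (n - 1) % 9 = (s - 1) % 9 := by omega
    omega

theorem pv_loop_eq : ∀ (f : Nat) (n : Int), n.toNat < f → pvDigitLoop f n = pvDr n := by
  intro f
  induction f with
  | zero => intro n h; omega
  | succ f ih =>
    intro n h
    rw [pvDigitLoop]
    by_cases h10 : n ≥ 10
    · rw [if_pos h10]
      obtain ⟨hs1, hslt⟩ := pv_digitSum_bounds n h10
      have hfuel : (pvDigitSum n).toNat < f := by omega
      rw [ih _ hfuel]
      exact pv_dr_congr _ _ hs1 h10 (pv_digitSum_mod9 n h10)
    · rw [if_neg h10, pvDr, if_pos (by omega)]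

-- ===== VERDICT (by name: the statement is the Claim_ definition above) =====
theorem sig_freq_rit_fig_spec : Claim_equal_sig_freq_rit_fig := by
  intro pair freq last ctx _ _
  unfold Spec_sig_freq_rit_fig sig_freq_rit_fig sig_freq_rit_fig_alt
  rw [pv_loop_eq (pair.1.toNat + 1) pair.1 (by omega),
    pv_loop_eq (pair.2.toNat + 1) pair.2 (by omega)]
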